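-- pv_equiv track=rewrite | github.com/LingLing40Hours/counting-permutations-restricted-by-length-of-longest-consecutive-subsequence | Restricted Permutations.py | consecutivity
-- ===== SOURCE A (Python) =====
-- def consecutivity(n, permutation, wrap, cyclic):
--     k = len(permutation);
--     if k==0:
--         return 0;
--     if wrap==False and cyclic==False:
--         answer = 1;
--         temp = 1;
--         for i in range(1,k):
--             if abs(permutation[i]-permutation[i-1])!=1: #end streak
--                 if temp > answer:
--                     answer = temp;
--                 temp = 1;
--             elif i==k-1: #force end streak
--                 temp += 1;
--                 if temp > answer:
--                     answer = temp;
--             else: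
--                 temp += 1;
--         return answer;
--     if wrap==True and cyclic==False:
--         answer = 1;
--         temp = 1;
--         for i in range(1,k):
--             diff = abs(permutation[i]-permutation[i-1]);
--             if diff!=1 and diff!=n-1: #end streak
--                 if temp > answer:
--                     answer = temp;
--                 temp = 1;
--             elif i==k-1: #force end streak
--                 temp += 1;
--                 if temp > answer:
--                     answer = temp;
--             else:
--                 temp += 1;
--         return answer;
--     if wrap==True and cyclic==True:
--         answer = 1;
--         temp = 1;
--         start = 0;
--         end = 1;
--         for i in range(1,k):
--             diff = abs(permutation[i]-permutation[i-1]);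
--             if diff!=1 and diff!=n-1: #end streak
--                 if i==temp: #is starting streak
--                     start = temp;
--                 if temp > answer:
--                     answer = temp;
--                 temp = 1;
--             elif i==k-1: #force end streak
--                 temp += 1;
--                 end = temp;
--                 if temp > answer:
--                     answer = temp;
--             else:
--                 temp += 1;
--         diffSE = abs(permutation[0]-permutation[-1]);
--         if (diffSE==1 or diffSE==n-1) and start+end > answer:
--             answer = start+end;
--         return answer;
--     if wrap==False and cyclic==True:
--         answer = 1;
--         temp = 1;
--         start = 0;
--         end = 1;
--         for i in range(1,k):
--             diff = abs(permutation[i]-permutation[i-1]);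
--             if diff!=1: #end streak
--                 if i==temp: #is starting streak
--                     start = temp;
--                 if temp > answer:
--                     answer = temp;
--                 temp = 1;
--             elif i==k-1: #force end streak
--                 temp += 1;
--                 end = temp;
--                 if temp > answer:
--                     answer = temp;
--             else:
--                 temp += 1;
--         diffSE = abs(permutation[0]-permutation[-1]);
--         if diffSE==1 and start+end > answer:
--             answer = start+end;
--         return answer;
-- ===== SOURCE B (Python) =====
-- def consecutivity(n, permutation, wrap, cyclic):
--     if not permutation:
--         return 0
--     def adj(a, b):
--         d = abs(a - b)
--         return d == 1 or (wrap and d == n - 1)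
--     runs = []
--     cur = 1
--     for prev, x in zip(permutation, permutation[1:]):
--         if adj(prev, x):
--             cur += 1
--         else:
--             runs.append(cur)
--             cur = 1
--     runs.append(cur)
--     answer = max(runs)
--     if cyclic and len(runs) > 1 and adj(permutation[0], permutation[-1]):
--         answer = max(answer, runs[0] + runs[-1])
--     return answer
-- ===== Notes on version B (the rewrite author's own statement) =====
-- stated objective: simpler
-- what changed: Replaces A's four duplicated inline-max streak loops (each tracking answer/temp/start/end with an i==k-1 forced-end and i==temp start-detection) by one run-length-collecting scan with a parameterized adjacency predicate, a max over the run list, and a single cyclic wrap-join post-step on the first and last runs.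
import Mathlib
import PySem

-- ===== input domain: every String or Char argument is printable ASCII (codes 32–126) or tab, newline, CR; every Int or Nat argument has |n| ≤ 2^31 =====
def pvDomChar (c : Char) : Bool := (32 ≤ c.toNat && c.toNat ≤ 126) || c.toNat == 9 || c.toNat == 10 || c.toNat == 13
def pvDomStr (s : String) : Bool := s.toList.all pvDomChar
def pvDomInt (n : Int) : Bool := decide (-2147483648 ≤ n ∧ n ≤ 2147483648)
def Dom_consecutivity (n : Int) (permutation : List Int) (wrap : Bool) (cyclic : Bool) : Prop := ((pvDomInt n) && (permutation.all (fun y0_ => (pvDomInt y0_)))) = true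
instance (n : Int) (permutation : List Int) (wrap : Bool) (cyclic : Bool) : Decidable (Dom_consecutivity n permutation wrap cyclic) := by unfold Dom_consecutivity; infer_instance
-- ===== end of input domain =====

-- B replaces A's four duplicated streak loops by one scan building the list of run
-- lengths (with a parameterized adjacency predicate) plus a max and a cyclic wrap-join
-- post-step; objective: simpler.

-- ===== PORT A =====
-- the loop of the two non-cyclic cases of A, over the pairs (p[i-1], p[i]) with index i;
-- isBreak receives the value diff = abs(p[i]-p[i-1])
def pvLoopNC (k : Int) (isBreak : Int → Bool) (answer temp i : Int) :
    List (Int × Int) → Int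
  | [] => answer
  | (prev, cur) :: rest =>
    let diff := |cur - prev|
    if isBreak diff then
      pvLoopNC k isBreak (if temp > answer then temp else answer) 1 (i + 1) rest
    else if i = k - 1 then
      pvLoopNC k isBreak (if temp + 1 > answer then temp + 1 else answer) (temp + 1) (i + 1) rest
    else
      pvLoopNC k isBreak answer (temp + 1) (i + 1) rest

-- the loop of the two cyclic cases of A; state also carries start and end
def pvLoopC (k : Int) (isBreak : Int → Bool) (answer temp start end_ i : Int) :
    List (Int × Int) → Int × Int × Int
  | [] => (answer, start, end_)
  | (prev, cur) :: rest =>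
    let diff := |cur - prev|
    if isBreak diff then
      pvLoopC k isBreak (if temp > answer then temp else answer) 1
        (if i = temp then temp else start) end_ (i + 1) rest
    else if i = k - 1 then
      pvLoopC k isBreak (if temp + 1 > answer then temp + 1 else answer) (temp + 1)
        start (temp + 1) (i + 1) rest
    else
      pvLoopC k isBreak answer (temp + 1) start end_ (i + 1) rest

def consecutivity (n : Int) (permutation : List Int) (wrap : Bool) (cyclic : Bool) : Int :=
  let k : Int := permutation.length
  if k = 0 then 0
  else
    let pairs := permutation.zip (permutation.drop 1)
    if wrap = false && cyclic = false then
      pvLoopNC k (fun d => d != 1) 1 1 1 pairs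
    else if wrap = true && cyclic = false then
      pvLoopNC k (fun d => d != 1 && d != n - 1) 1 1 1 pairs
    else if wrap = true && cyclic = true then
      let r := pvLoopC k (fun d => d != 1 && d != n - 1) 1 1 0 1 1 pairs
      let diffSE := |PySem.List.pyGetD permutation 0 0 - PySem.List.pyGetD permutation (-1) 0|
      if (diffSE == 1 || diffSE == n - 1) && r.2.1 + r.2.2 > r.1 then r.2.1 + r.2.2 else r.1
    else
      let r := pvLoopC k (fun d => d != 1) 1 1 0 1 1 pairs
      let diffSE := |PySem.List.pyGetD permutation 0 0 - PySem.List.pyGetD permutation (-1) 0|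
      if diffSE == 1 && r.2.1 + r.2.2 > r.1 then r.2.1 + r.2.2 else r.1

-- ===== PORT B =====
-- Source B's local predicate adj(a, b)
def pvAdj (n : Int) (wrap : Bool) (a b : Int) : Bool :=
  |a - b| == 1 || (wrap && |a - b| == n - 1)

-- the body of Source B's single run-collecting loop, state = (runs, cur)
def pvStep (adjb : Int → Int → Bool) (s : List Int × Int) (pc : Int × Int) : List Int × Int :=
  if adjb pc.1 pc.2 then (s.1, s.2 + 1) else (s.1 ++ [s.2], 1)

def consecutivity_alt (n : Int) (permutation : List Int) (wrap : Bool) (cyclic : Bool) : Int :=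
  if permutation.isEmpty then 0
  else
    let s := (permutation.zip (permutation.drop 1)).foldl (pvStep (pvAdj n wrap)) ([], 1)
    let runs := s.1 ++ [s.2]
    let answer := (PySem.List.max? runs (fun y => y)).getD 0
    if cyclic && decide (1 < runs.length) &&
        pvAdj n wrap (permutation.headD 0) (permutation.getLastD 0) then
      max answer (runs.headD 0 + runs.getLastD 0)
    else answer

-- ===== PRECONDITION & SPEC =====
def Spec_consecutivity (n : Int) (permutation : List Int) (wrap : Bool) (cyclic : Bool) (out : Int) : Prop := out = consecutivity_alt n permutation wrap cyclic
instance (n : Int) (permutation : List Int) (wrap : Bool) (cyclic : Bool) (out : Int) : Decidable (Spec_consecutivity n permutation wrap cyclic out) := by unfold Spec_consecutivity; infer_instance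

-- ===== CLAIM (what is proved, stated in full; the proofs are below) =====
def Claim_equal_consecutivity : Prop := ∀ (n : Int) (permutation : List Int) (wrap : Bool) (cyclic : Bool), Dom_consecutivity n permutation wrap cyclic → Spec_consecutivity n permutation wrap cyclic (consecutivity n permutation wrap cyclic)

-- ===== LEMMAS AND PROOFS =====

theorem le_foldl_max_self : ∀ (l : List Int) (a : Int), a ≤ l.foldl max a
  | [], _ => le_refl _
  | x :: t, a => le_trans (le_max_left a x) (le_foldl_max_self t (max a x))

theorem foldl_max_append (l : List Int) (a c : Int) :
    (l ++ [c]).foldl max a = max (l.foldl max a) c := by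
  simp [List.foldl_append]

-- all run lengths produced by Source B's loop are ≥ 1
theorem pvStep_pos (adjb : Int → Int → Bool) :
    ∀ (pairs : List (Int × Int)) (runs : List Int) (temp : Int),
      (∀ x ∈ runs, 1 ≤ x) → 1 ≤ temp →
      (∀ x ∈ (pairs.foldl (pvStep adjb) (runs, temp)).1, 1 ≤ x) ∧
        1 ≤ (pairs.foldl (pvStep adjb) (runs, temp)).2 := by
  intro pairs
  induction pairs with
  | nil => intro runs temp h1 h2; exact ⟨h1, h2⟩
  | cons p rest ih =>
    intro runs temp h1 h2
    simp only [List.foldl_cons, pvStep]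
    by_cases h : adjb p.1 p.2 = true
    · simp only [h, if_pos]
      exact ih runs (temp + 1) h1 (by omega)
    · simp only [h, if_neg, Bool.false_eq_true, not_false_iff]
      refine ih (runs ++ [temp]) 1 ?_ (by omega)
      intro x hx
      rcases List.mem_append.mp hx with hx | hx
      · exact h1 x hx
      · simp at hx; omega

-- python max(xs) on a list of run lengths equals the running max from 1
theorem max_getD_eq_foldl (R : List Int) (hne : R ≠ []) (hpos : ∀ x ∈ R, 1 ≤ x) :
    (PySem.List.max? R (fun y => y)).getD 0 = R.foldl max 1 := by
  cases R with
  | nil => exact absurd rfl hne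
  | cons r t =>
    rw [PySem.List.max?_id_cons]
    have hr : 1 ≤ r := hpos r (by simp)
    simp only [Option.getD_some, List.foldl_cons]
    have : max 1 r = r := by omega
    rw [this]

-- main invariant for the non-cyclic loop
theorem loopNC_eq (adjb : Int → Int → Bool) (isBreak : Int → Bool)
    (hbr : ∀ prev cur : Int, isBreak |cur - prev| = !adjb prev cur) (k : Int) :
    ∀ (pairs : List (Int × Int)) (i answer temp : Int) (runs : List Int),
      i + pairs.length = k →
      answer = runs.foldl max 1 →
      1 ≤ temp →
      (pairs = [] → temp ≤ answer) →
      pvLoopNC k isBreak answer temp i pairs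
        = (let s := pairs.foldl (pvStep adjb) (runs, temp); (s.1 ++ [s.2]).foldl max 1) := by
  intro pairs
  induction pairs with
  | nil =>
    intro i answer temp runs hik hans htemp hend
    simp only [pvLoopNC, List.foldl_nil]
    rw [foldl_max_append]
    have := hend rfl
    omega
  | cons pc rest ih =>
    intro i answer temp runs hik hans htemp hend
    obtain ⟨prev, cur⟩ := pc
    simp only [pvLoopNC, List.foldl_cons, pvStep, hbr prev cur]
    by_cases hadj : adjb prev cur = true
    · simp only [hadj, Bool.not_true, Bool.false_eq_true, if_false, if_true]
      by_cases hlast : i = k - 1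
      · have hrest : rest = [] := by
          have hl := hik
          simp only [List.length_cons] at hl
          have : rest.length = 0 := by omega
          exact List.length_eq_zero_iff.mp this
        subst hrest
        rw [if_pos hlast]
        simp only [pvLoopNC, List.foldl_nil]
        rw [foldl_max_append]
        split_ifs <;> omega
      · rw [if_neg hlast]
        refine ih (i + 1) answer (temp + 1) runs ?_ hans (by omega) ?_
        · simp only [List.length_cons] at hik; omega
        · intro hr
          subst hr
          simp only [List.length_cons, List.length_nil] at hik
          omega
    · simp only [Bool.not_eq_true] at hadj
      simp only [hadj, Bool.not_false, if_true]
      have hans1 : (1 : Int) ≤ answer := hans ▸ le_foldl_max_self runs 1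
      refine ih (i + 1) (if temp > answer then temp else answer) 1 (runs ++ [temp]) ?_ ?_
        (le_refl 1) ?_
      · simp only [List.length_cons] at hik; omega
      · rw [foldl_max_append, ← hans]
        split_ifs <;> omega
      · intro _; split_ifs <;> omega

-- main invariant for the cyclic loop
theorem loopC_eq (adjb : Int → Int → Bool) (isBreak : Int → Bool)
    (hbr : ∀ prev cur : Int, isBreak |cur - prev| = !adjb prev cur) (k : Int) :
    ∀ (pairs : List (Int × Int)) (i answer temp start end_ : Int) (runs : List Int),
      i + pairs.length = k →
      1 ≤ i →
      answer = runs.foldl max 1 →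
      1 ≤ temp →
      (runs = [] → temp = i ∧ start = 0) →
      (runs ≠ [] → temp < i ∧ start = runs.headD 0) →
      (pairs ≠ [] → end_ = 1) →
      (pairs = [] → temp ≤ answer ∧ end_ = temp) →
      pvLoopC k isBreak answer temp start end_ i pairs
        = (let s := pairs.foldl (pvStep adjb) (runs, temp);
           let R := s.1 ++ [s.2];
           (R.foldl max 1, (if R.length ≤ 1 then 0 else R.headD 0), R.getLastD 0)) := by
  intro pairs
  induction pairs with
  | nil =>
    intro i answer temp start end_ runs hik hi hans htemp hem hne hp1 hp0
    obtain ⟨hta, het⟩ := hp0 rfl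
    simp only [pvLoopC, List.foldl_nil]
    refine Prod.ext ?_ (Prod.ext ?_ ?_)
    · show answer = (runs ++ [temp]).foldl max 1
      rw [foldl_max_append]; omega
    · show start = _
      rcases h : runs with _ | ⟨r, t⟩
      · simp only [List.nil_append, List.length_cons, List.length_nil]
        rw [if_pos (by omega)]
        exact (hem h).2
      · have hcons : runs ≠ [] := by simp [h]
        rw [← h]
        rw [if_neg (by simp [h])]
        have := (hne hcons).2
        simp [this, h]
    · show end_ = _
      simp [het]
  | cons pc rest ih =>
    intro i answer temp start end_ runs hik hi hans htemp hem hne hp1 hp0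
    obtain ⟨prev, cur⟩ := pc
    simp only [pvLoopC, List.foldl_cons, pvStep, hbr prev cur]
    by_cases hadj : adjb prev cur = true
    · simp only [hadj, Bool.not_true, Bool.false_eq_true, if_false, if_true]
      by_cases hlast : i = k - 1
      · have hrest : rest = [] := by
          have hl := hik
          simp only [List.length_cons] at hl
          exact List.length_eq_zero_iff.mp (by omega)
        subst hrest
        rw [if_pos hlast]
        simp only [pvLoopC, List.foldl_nil]
        refine Prod.ext ?_ (Prod.ext ?_ ?_)
        · show _ = (runs ++ [temp + 1]).foldl max 1
          rw [foldl_max_append]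
          split_ifs <;> omega
        · show start = _
          rcases h : runs with _ | ⟨r, t⟩
          · simp only [List.nil_append, List.length_cons, List.length_nil]
            rw [if_pos (by omega)]
            exact (hem h).2
          · have hcons : runs ≠ [] := by simp [h]
            rw [← h]
            rw [if_neg (by simp [h])]
            have := (hne hcons).2
            simp [this, h]
        · show temp + 1 = _
          simp
      · rw [if_neg hlast]
        refine ih (i + 1) answer (temp + 1) start end_ runs ?_ (by omega) hans (by omega)
          ?_ ?_ ?_ ?_
        · simp only [List.length_cons] at hik; omega
        · intro h; obtain ⟨h1, h2⟩ := hem h; exact ⟨by omega, h2⟩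
        · intro h; obtain ⟨h1, h2⟩ := hne h; exact ⟨by omega, h2⟩
        · intro _; exact hp1 (by simp)
        · intro h
          subst h
          simp only [List.length_cons, List.length_nil] at hik
          omega
    · simp only [Bool.not_eq_true] at hadj
      simp only [hadj, Bool.not_false, if_true]
      have hans1 : (1 : Int) ≤ answer := hans ▸ le_foldl_max_self runs 1
      have hstart : (if i = temp then temp else start) = (runs ++ [temp]).headD 0 := by
        rcases h : runs with _ | ⟨r, t⟩
        · obtain ⟨h1, _⟩ := hem h
          rw [if_pos h1.symm]
          simp
        · have hcons : runs ≠ [] := by simp [h]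
          obtain ⟨h1, h2⟩ := hne hcons
          rw [if_neg (by omega)]
          simp [h2, h]
      rw [hstart]
      refine ih (i + 1) (if temp > answer then temp else answer) 1
        ((runs ++ [temp]).headD 0) end_ (runs ++ [temp]) ?_ (by omega) ?_ (le_refl 1)
        ?_ ?_ ?_ ?_
      · simp only [List.length_cons] at hik; omega
      · rw [foldl_max_append, ← hans]; split_ifs <;> omega
      · intro h; exact absurd h (by simp)
      · intro _
        constructor
        · omega
        · rfl
      · intro _; exact hp1 (by simp)
      · intro h
        subst h
        refine ⟨by split_ifs <;> omega, ?_⟩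
        simp only [List.length_cons, List.length_nil] at hik
        exact hp1 (by simp)

theorem pyGetD_zero_cons' (x : Int) (t : List Int) :
    PySem.List.pyGetD (x :: t) 0 0 = (x :: t).headD 0 := by
  simp [PySem.List.pyGetD_zero_cons]

theorem pyGetD_neg_one_cons (x : Int) (t : List Int) :
    PySem.List.pyGetD (x :: t) (-1) 0 = (x :: t).getLastD 0 := by
  have h := PySem.List.pyGetD_neg_one (xs := x :: t) (d := (0 : Int)) (by simp)
  rw [h]
  simp [List.getLastD_eq_getLast?, List.getLast?_eq_some_getLast (l := x :: t) (by simp)]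

theorem runs_pos (adjb : Int → Int → Bool) (pairs : List (Int × Int)) :
    ∀ x ∈ (pairs.foldl (pvStep adjb) ([], 1)).1 ++ [(pairs.foldl (pvStep adjb) ([], 1)).2],
      1 ≤ x := by
  obtain ⟨h1, h2⟩ := pvStep_pos adjb pairs [] 1 (by simp) (le_refl 1)
  intro x hx
  rcases List.mem_append.mp hx with hx | hx
  · exact h1 x hx
  · simp at hx; omega

-- assembly of a non-cyclic case of A against B's loop-plus-max
theorem nc_assemble (adjb : Int → Int → Bool) (isBreak : Int → Bool)
    (hbr : ∀ prev cur : Int, isBreak |cur - prev| = !adjb prev cur)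
    (k : Int) (pairs : List (Int × Int)) (hk : 1 + pairs.length = k) :
    pvLoopNC k isBreak 1 1 1 pairs
      = (let s := pairs.foldl (pvStep adjb) ([], 1)
         (PySem.List.max? (s.1 ++ [s.2]) (fun y => y)).getD 0) := by
  rw [loopNC_eq adjb isBreak hbr k pairs 1 1 1 [] hk rfl (le_refl 1) (fun _ => le_refl 1)]
  rw [max_getD_eq_foldl _ (by simp) (runs_pos adjb pairs)]

-- assembly of a cyclic case of A against B's loop-plus-max-plus-join
theorem cyclic_assemble (adjb : Int → Int → Bool) (isBreak : Int → Bool)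
    (hbr : ∀ prev cur : Int, isBreak |cur - prev| = !adjb prev cur)
    (k : Int) (pairs : List (Int × Int)) (hk : 1 + pairs.length = k) (adjSE : Bool) :
    (let r := pvLoopC k isBreak 1 1 0 1 1 pairs
     if (adjSE && decide (r.2.1 + r.2.2 > r.1)) = true then r.2.1 + r.2.2 else r.1)
      = (let s := pairs.foldl (pvStep adjb) ([], 1)
         let runs := s.1 ++ [s.2]
         let answer := (PySem.List.max? runs (fun y => y)).getD 0
         if (true && decide (1 < runs.length) && adjSE) = true then
           max answer (runs.headD 0 + runs.getLastD 0)
         else answer) := by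
  have hloop := loopC_eq adjb isBreak hbr k pairs 1 1 1 0 1 [] hk (le_refl 1) rfl
    (le_refl 1) (fun _ => ⟨rfl, rfl⟩) (fun h => absurd rfl h) (fun _ => rfl)
    (fun _ => ⟨le_refl 1, rfl⟩)
  simp only [] at hloop ⊢
  rw [hloop]
  rw [max_getD_eq_foldl _ (by simp) (runs_pos adjb pairs)]
  obtain ⟨hp1, hp2⟩ := pvStep_pos adjb pairs [] 1 (by simp) (le_refl 1)
  simp only []
  rcases hs : (pairs.foldl (pvStep adjb) ([], 1)).1 with _ | ⟨a, u⟩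
  · -- a single run: no join on either side
    have hc1 : 1 ≤ (pairs.foldl (pvStep adjb) ([], 1)).2 := hp2
    simp only [List.nil_append, List.length_cons, List.length_nil, List.foldl_cons,
      List.foldl_nil, List.headD_cons, Nat.zero_add]
    have hL : List.getLastD [(pairs.foldl (pvStep adjb) ([], 1)).2] 0
        = (pairs.foldl (pvStep adjb) ([], 1)).2 := rfl
    rw [hL]
    have hM : max 1 (pairs.foldl (pvStep adjb) ([], 1)).2
        = (pairs.foldl (pvStep adjb) ([], 1)).2 := by omega
    rw [hM]
    simp
  · -- at least two runs
    have hlen : ¬ ((a :: u) ++ [(pairs.foldl (pvStep adjb) ([], 1)).2]).length ≤ 1 := by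
      simp
    rw [if_neg hlen]
    have hlen' : decide (1 < ((a :: u) ++ [(pairs.foldl (pvStep adjb) ([], 1)).2]).length)
        = true := by simp
    rw [hlen', Bool.true_and, Bool.true_and]
    cases adjSE with
    | false => simp
    | true =>
      rw [Bool.true_and]
      set R := (a :: u) ++ [(pairs.foldl (pvStep adjb) ([], 1)).2] with hR
      by_cases hgt : R.headD 0 + R.getLastD 0 > R.foldl max 1
      · rw [if_pos (by simpa using hgt), if_pos rfl]
        omega
      · rw [if_neg (by simpa using hgt), if_pos rfl]
        omega

-- ===== VERDICT (by name: the statement is the Claim_ definition above) =====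
theorem consecutivity_spec : Claim_equal_consecutivity := by
  intro n permutation wrap cyclic _hdom
  show consecutivity n permutation wrap cyclic = consecutivity_alt n permutation wrap cyclic
  cases permutation with
  | nil => simp [consecutivity, consecutivity_alt]
  | cons x t =>
    have hk : (1 : Int) + ((x :: t).zip (List.drop 1 (x :: t))).length
        = ((x :: t).length : Int) := by
      simp [List.length_zip]
      omega
    simp only [consecutivity, consecutivity_alt, List.isEmpty_cons, if_neg (by simp only [List.length_cons]; push_cast; omega : ¬ ((x :: t).length : Int) = 0), Bool.false_eq_true, if_false, pyGetD_zero_cons', pyGetD_neg_one_cons]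
    cases wrap <;> cases cyclic <;>
      simp only [Bool.false_and, Bool.true_and, Bool.and_false, Bool.and_true, decide_true,
        decide_false, Bool.false_eq_true, if_false, if_true]
    · -- wrap = false, cyclic = false
      have hbr : ∀ prev cur : Int, ((fun d => d != 1) |cur - prev|) = !pvAdj n false prev cur := by
        intro prev cur
        simp [pvAdj, bne, abs_sub_comm cur prev]
      exact nc_assemble (pvAdj n false) (fun d => d != 1) hbr _ _ hk
    · -- wrap = false, cyclic = true
      have hbr : ∀ prev cur : Int, ((fun d => d != 1) |cur - prev|) = !pvAdj n false prev cur := by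
        intro prev cur
        simp [pvAdj, bne, abs_sub_comm cur prev]
      have hse : (|(x :: t).headD 0 - (x :: t).getLastD 0| == 1)
          = pvAdj n false ((x :: t).headD 0) ((x :: t).getLastD 0) := by
        simp [pvAdj]
      rw [hse]
      have := cyclic_assemble (pvAdj n false) (fun d => d != 1) hbr _ _ hk
        (pvAdj n false ((x :: t).headD 0) ((x :: t).getLastD 0))
      simpa using this
    · -- wrap = true, cyclic = false
      have hbr : ∀ prev cur : Int,
          ((fun d => d != 1 && d != n - 1) |cur - prev|) = !pvAdj n true prev cur := by
        intro prev cur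
        simp [pvAdj, bne, Bool.not_or, abs_sub_comm cur prev]
      exact nc_assemble (pvAdj n true) (fun d => d != 1 && d != n - 1) hbr _ _ hk
    · -- wrap = true, cyclic = true
      have hbr : ∀ prev cur : Int,
          ((fun d => d != 1 && d != n - 1) |cur - prev|) = !pvAdj n true prev cur := by
        intro prev cur
        simp [pvAdj, bne, Bool.not_or, abs_sub_comm cur prev]
      have hse : (|(x :: t).headD 0 - (x :: t).getLastD 0| == 1
            || |(x :: t).headD 0 - (x :: t).getLastD 0| == n - 1)
          = pvAdj n true ((x :: t).headD 0) ((x :: t).getLastD 0) := by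
        simp [pvAdj]
      rw [hse]
      have := cyclic_assemble (pvAdj n true) (fun d => d != 1 && d != n - 1) hbr _ _ hk
        (pvAdj n true ((x :: t).headD 0) ((x :: t).getLastD 0))
      simpa using this
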